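-- pv_equiv track=rewrite | github.com/Aligotr/open-webui-image-api | main.py | _build_files_payload
-- ===== SOURCE A (Python) =====
-- MAX_FILES_TOTAL = 5
--
-- def _build_files_payload(
--
--     images: list[str],
-- ) -> dict[str, list[str]]:
--     """
--     Формирование полей filesUrl и filesBase64 для запроса к провайдеру.
--
--     Правила разбора:
--     - data:image/...;base64,... -> filesBase64;
--     - http/https-ссылки -> filesUrl;
--     - суммарное количество элементов (filesUrl + filesBase64) <= MAX_FILES_TOTAL.
--     """
--     files_url: list[str] = []
--     files_b64: list[str] = []
--
--     for img in images:
--         if len(files_url) + len(files_b64) >= MAX_FILES_TOTAL: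
--             break
--
--         if img.startswith("data:image/"):
--             files_b64.append(img)
--         elif img.startswith(("http://", "https://")):
--             files_url.append(img)
--
--     result: dict[str, list[str]] = {}
--     if files_url:
--         result["filesUrl"] = files_url
--     if files_b64:
--         result["filesBase64"] = files_b64
--
--     return result
-- ===== SOURCE B (Python) =====
-- MAX_FILES_TOTAL = 5
--
-- def _build_files_payload(images: list[str]) -> dict[str, list[str]]:
--     valid = [img for img in images
--              if img.startswith("data:image/") or img.startswith(("http://", "https://"))]
--     valid = valid[:MAX_FILES_TOTAL]
--     files_b64 = [i for i in valid if i.startswith("data:image/")]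
--     files_url = [i for i in valid if i.startswith(("http://", "https://"))]
--     result: dict[str, list[str]] = {}
--     if files_url:
--         result["filesUrl"] = files_url
--     if files_b64:
--         result["filesBase64"] = files_b64
--     return result
-- ===== Notes on version B (the rewrite author's own statement) =====
-- stated objective: simpler
-- what changed: A's single stateful loop with a running-total break is replaced by filter-then-slice-then-partition: one pass keeps the valid items, a slice caps them at MAX_FILES_TOTAL, and two comprehensions split them into the base64 and URL buckets.
import Mathlib
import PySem

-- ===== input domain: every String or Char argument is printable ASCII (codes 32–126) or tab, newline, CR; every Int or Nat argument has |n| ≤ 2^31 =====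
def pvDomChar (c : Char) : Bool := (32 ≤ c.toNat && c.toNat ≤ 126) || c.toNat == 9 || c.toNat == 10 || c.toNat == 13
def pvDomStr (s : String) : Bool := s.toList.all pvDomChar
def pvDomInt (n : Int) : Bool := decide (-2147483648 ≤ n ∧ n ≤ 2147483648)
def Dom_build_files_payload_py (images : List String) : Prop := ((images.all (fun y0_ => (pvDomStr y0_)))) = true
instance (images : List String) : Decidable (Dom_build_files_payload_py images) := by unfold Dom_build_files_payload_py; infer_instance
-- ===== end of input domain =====

-- B replaces A's single stateful loop (running total, break at 5) by filter-then-slice-then-partition; objective: simpler.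

-- ===== PORT A =====
-- img.startswith("data:image/")
def pvIsB64 (s : String) : Bool := PySem.Str.startswith s "data:image/"
-- img.startswith(("http://", "https://"))
def pvIsUrl (s : String) : Bool := PySem.Str.startswith s "http://" || PySem.Str.startswith s "https://"

-- the for-loop of A, state = (files_url, files_b64), break modelled by returning the state
def pvLoopA : List String → List String → List String → List String × List String
  | [], u, b => (u, b)
  | img :: rest, u, b =>
    if u.length + b.length ≥ 5 then (u, b)
    else if pvIsB64 img then pvLoopA rest u (b ++ [img])
    else if pvIsUrl img then pvLoopA rest (u ++ [img]) b
    else pvLoopA rest u b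

-- result dict built by inserting into an empty dict = the association list in insertion order
def pvAssemble (u b : List String) : List (String × List String) :=
  (if u ≠ [] then [("filesUrl", u)] else []) ++ (if b ≠ [] then [("filesBase64", b)] else [])

def build_files_payload_py (images : List String) : List (String × List String) :=
  let p := pvLoopA images [] []
  pvAssemble p.1 p.2

-- ===== PORT B =====
def build_files_payload_py_alt (images : List String) : List (String × List String) :=
  let valid := (images.filter (fun i => pvIsB64 i || pvIsUrl i)).take 5
  let files_b64 := valid.filter pvIsB64
  let files_url := valid.filter pvIsUrl
  pvAssemble files_url files_b64

-- ===== PRECONDITION & SPEC =====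
def Spec_build_files_payload_py (images : List String) (out : List (String × List String)) : Prop := out = build_files_payload_py_alt images
instance (images : List String) (out : List (String × List String)) : Decidable (Spec_build_files_payload_py images out) := by unfold Spec_build_files_payload_py; infer_instance

-- ===== CLAIM (what is proved, stated in full; the proofs are below) =====
def Claim_equal_build_files_payload_py : Prop := ∀ (images : List String), Dom_build_files_payload_py images → Spec_build_files_payload_py images (build_files_payload_py images)

-- ===== LEMMAS AND PROOFS =====

-- a string starting with "data:image/" cannot start with "http://" or "https://"
theorem pvB64_not_url (s : String) (h : pvIsB64 s = true) : pvIsUrl s = false := by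
  unfold pvIsB64 at h
  unfold pvIsUrl
  simp only [PySem.Str.startswith_eq, PySem.Chars.startswith_iff, List.IsPrefix] at h ⊢
  obtain ⟨t, ht⟩ := h
  rw [Bool.or_eq_false_iff]
  constructor <;>
  · rw [Bool.eq_false_iff]
    intro hcon
    rw [PySem.Chars.startswith_iff, List.IsPrefix] at hcon
    obtain ⟨t', ht'⟩ := hcon
    rw [← ht'] at ht
    simp at ht

theorem pvLoop_eq (xs : List String) : ∀ (u b : List String),
    pvLoopA xs u b =
      (u ++ ((xs.filter (fun i => pvIsB64 i || pvIsUrl i)).take (5 - (u.length + b.length))).filter pvIsUrl,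
       b ++ ((xs.filter (fun i => pvIsB64 i || pvIsUrl i)).take (5 - (u.length + b.length))).filter pvIsB64) := by
  induction xs with
  | nil => intro u b; simp [pvLoopA]
  | cons x xs ih =>
    intro u b
    by_cases hbig : u.length + b.length ≥ 5
    · have h0 : 5 - (u.length + b.length) = 0 := by omega
      simp [pvLoopA, hbig, h0]
    · have hk : 5 - (u.length + b.length) = (4 - (u.length + b.length)) + 1 := by omega
      by_cases hb : pvIsB64 x
      · have hu : pvIsUrl x = false := pvB64_not_url x hb
        have h1 := ih u (b ++ [x])
        simp only [List.length_append, List.length_cons, List.length_nil] at h1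
        have e1 : 5 - (u.length + (b.length + 1)) = 4 - (u.length + b.length) := by omega
        rw [e1] at h1
        simp [pvLoopA, hbig, hb, hu, hk, h1]
      · by_cases hu : pvIsUrl x
        · have h1 := ih (u ++ [x]) b
          simp only [List.length_append, List.length_cons, List.length_nil] at h1
          have e1 : 5 - (u.length + 1 + b.length) = 4 - (u.length + b.length) := by omega
          rw [e1] at h1
          simp [pvLoopA, hbig, hb, hu, hk, h1]
        · have h1 := ih u b
          simp [pvLoopA, hbig, hb, hu, h1]

-- ===== VERDICT (by name: the statement is the Claim_ definition above) =====
theorem build_files_payload_py_spec : Claim_equal_build_files_payload_py := by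
  intro images _
  unfold Spec_build_files_payload_py build_files_payload_py build_files_payload_py_alt
  have := pvLoop_eq images [] []
  simp at this
  rw [this]
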